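-- pv_equiv track=rewrite | github.com/TheViking733n/CodeForces-Python-Solutions | Partitioning_a_number.py | partition_generalised
-- ===== SOURCE A (Python) =====
-- def partition_generalised(n, arr): # No. of partition of n using only arr
--     # Note: arr must be sorted
--     arr = sorted(arr)
--     k = len(arr)
--     dp = [0] * (n + 1)
--     dp[0] = 1
--     for i in arr:
--         for j in range(i, n + 1):
--             dp[j] += dp[j - i]
--     return dp[n]
-- ===== SOURCE B (Python) =====
-- def partition_generalised(n, arr): # No. of partition of n using only arr
--     # Generating functions: answer = [x^n] of prod_i 1/(1 - x^{arr[i]}).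
--     # Divide and conquer over the parts; each half yields its coefficient
--     # vector up to degree n, halves are merged by polynomial convolution.
--     def series(parts):
--         if not parts:
--             return [1] + [0] * n
--         if len(parts) == 1:
--             p = parts[0]
--             return [1 if j % p == 0 else 0 for j in range(n + 1)]
--         mid = len(parts) // 2
--         a = series(parts[:mid])
--         b = series(parts[mid:])
--         return [sum(a[j] * b[m - j] for j in range(m + 1)) for m in range(n + 1)]
--     return series(arr)[n]
-- ===== Notes on version B (the rewrite author's own statement) =====
-- stated objective: alternative
-- what changed: Replaced the sort plus in-place coin-change dp sweep by a divide-and-conquer generating-function product: each single part yields the coefficient vector of 1/(1-x^p) (a divisibility indicator), halves are merged by explicit polynomial convolution, and the answer is coefficient n of the product.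
-- outside the precondition, e.g. on partition_generalised(0, [0]): A returns 2, B raises ZeroDivisionError; on partition_generalised(2, [0, 1]): A returns 2, B raises ZeroDivisionError
import Mathlib
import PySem

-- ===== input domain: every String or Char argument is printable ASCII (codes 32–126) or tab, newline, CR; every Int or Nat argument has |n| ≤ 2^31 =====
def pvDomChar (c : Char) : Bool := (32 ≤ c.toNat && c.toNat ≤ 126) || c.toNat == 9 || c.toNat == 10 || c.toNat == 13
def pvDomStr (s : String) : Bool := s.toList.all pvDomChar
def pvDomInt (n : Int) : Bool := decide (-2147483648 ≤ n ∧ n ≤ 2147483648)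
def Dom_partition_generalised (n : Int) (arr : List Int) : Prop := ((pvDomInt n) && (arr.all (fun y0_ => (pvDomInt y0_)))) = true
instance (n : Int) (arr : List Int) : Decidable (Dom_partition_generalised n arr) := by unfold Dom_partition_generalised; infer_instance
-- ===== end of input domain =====

-- B replaces A's sort + in-place coin-change dp sweep by a divide-and-conquer
-- generating-function product (single part -> divisibility-indicator coefficient vector,
-- halves merged by polynomial convolution) (objective: alternative; no speed claim).

-- ===== PORT A =====
-- pyGetD/pySetD with defaults are exact on Pre_ (every index hit is in range there; Python raises
-- IndexError exactly where n < 0 or a part is negative, and those inputs are outside Pre_).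
def partition_generalised (n : Int) (arr : List Int) : Int :=
  let arr' := PySem.List.sorted arr (fun x => x) false
  let dp0 : List Int := List.replicate (n + 1).toNat 0
  let dp1 := PySem.List.pySetD dp0 0 1
  let dp2 := arr'.foldl (fun dp i =>
      (PySem.List.pyRange i (n + 1) 1).foldl (fun dp j =>
        PySem.List.pySetD dp j (PySem.List.pyGetD dp j 0 + PySem.List.pyGetD dp (j - i) 0)) dp) dp1
  PySem.List.pyGetD dp2 n 0

-- ===== PORT B =====
-- series(parts): the coefficient vector (up to degree n) of prod 1/(1 - x^p) over parts.
-- '[1] + [0] * n' is '1 :: replicate n.toNat 0' (Python's negative list multiplier gives []);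
-- parts[:mid] / parts[mid:] with mid = len(parts)//2 ≥ 0 are take/drop; a[j] and b[m-j] are
-- in range on Pre_ (0 ≤ j ≤ m ≤ n, vectors of length n+1), where pyGetD is exact.
def pvSeriesB (n : Int) (parts : List Int) : List Int :=
  match parts with
  | [] => 1 :: List.replicate n.toNat 0
  | [p] => (PySem.List.pyRange 0 (n + 1) 1).map (fun j => if PySem.Int.mod j p = 0 then 1 else 0)
  | p :: q :: rest =>
      let a := pvSeriesB n ((p :: q :: rest).take ((p :: q :: rest).length / 2))
      let b := pvSeriesB n ((p :: q :: rest).drop ((p :: q :: rest).length / 2))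
      (PySem.List.pyRange 0 (n + 1) 1).map (fun m =>
        ((PySem.List.pyRange 0 (m + 1) 1).map
          (fun j => PySem.List.pyGetD a j 0 * PySem.List.pyGetD b (m - j) 0)).sum)
termination_by parts.length
decreasing_by
  · simp [List.length_take]; omega
  · simp [List.length_drop]; omega

def partition_generalised_alt (n : Int) (arr : List Int) : Int :=
  PySem.List.pyGetD (pvSeriesB n arr) n 0

-- ===== PRECONDITION & SPEC =====
-- Pre_ excludes n < 0 (A raises IndexError on the empty dp list), lists with a negative part
-- (A raises IndexError: dp[j-i] runs past the end), and lists containing 0, where the partition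
-- count is ill-defined (infinitely many multisets), A's value is an accidental doubling of its
-- in-place loop and B raises ZeroDivisionError on j % 0.
def Pre_partition_generalised (n : Int) (arr : List Int) : Prop :=
  0 ≤ n ∧ ∀ x ∈ arr, 1 ≤ x
instance (n : Int) (arr : List Int) : Decidable (Pre_partition_generalised n arr) := by
  unfold Pre_partition_generalised; infer_instance
def pvWitness_partition_generalised : Int × List Int := (6, [1, 2, 3])

def Spec_partition_generalised (n : Int) (arr : List Int) (out : Int) : Prop := out = partition_generalised_alt n arr
instance (n : Int) (arr : List Int) (out : Int) : Decidable (Spec_partition_generalised n arr out) := by unfold Spec_partition_generalised; infer_instance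

-- ===== CLAIM (what is proved, stated in full; the proofs are below) =====
def Claim_equal_partition_generalised : Prop := ∀ (n : Int) (arr : List Int), Dom_partition_generalised n arr → Pre_partition_generalised n arr → Spec_partition_generalised n arr (partition_generalised n arr)

-- ===== LEMMAS AND PROOFS =====

-- proof-side specification: the number of ways to write rem as a sum of parts from the list
-- (each list element usable any number of times), by recursion over the list
def pvCountB (parts : List Int) (rem : Int) : Int :=
  match parts with
  | [] => if rem = 0 then 1 else 0
  | p :: rest =>
      ((PySem.List.pyRange 0 (PySem.Int.floordiv rem p + 1) 1).map
        (fun c => pvCountB rest (rem - c * p))).sum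

theorem pvCountB_neg (L : List Int) (hL : ∀ x ∈ L, 1 ≤ x) (r : Int) (hr : r < 0) :
    pvCountB L r = 0 := by
  cases L with
  | nil => simp [pvCountB]; omega
  | cons p rest =>
    have hp : 1 ≤ p := hL p (List.mem_cons_self ..)
    have hq : PySem.Int.floordiv r p < 0 := by
      rw [PySem.Int.floordiv_eq_ediv_of_pos (by omega)]
      exact Int.ediv_neg_of_neg_of_pos hr (by omega)
    simp [pvCountB, PySem.List.pyRange_one_eq_nil (by omega : PySem.Int.floordiv r p + 1 ≤ 0)]

theorem pvCountB_zero (L : List Int) (hL : ∀ x ∈ L, 1 ≤ x) : pvCountB L 0 = 1 := by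
  induction L with
  | nil => simp [pvCountB]
  | cons p rest ih =>
    have hp : 1 ≤ p := hL p (List.mem_cons_self ..)
    have hq : PySem.Int.floordiv 0 p = 0 := by
      rw [PySem.Int.floordiv_eq_ediv_of_pos (by omega)]; simp
    have hr : PySem.List.pyRange 0 1 1 = [0] := by decide
    simp [pvCountB, hq, hr, ih (fun x hx => hL x (List.mem_cons_of_mem _ hx))]

theorem pvCountB_rec (p : Int) (rest : List Int) (hp : 1 ≤ p) (hrest : ∀ x ∈ rest, 1 ≤ x)
    (r : Int) : pvCountB (p :: rest) r = pvCountB rest r + pvCountB (p :: rest) (r - p) := by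
  have hall : ∀ x ∈ p :: rest, 1 ≤ x := by
    intro x hx
    rcases List.mem_cons.1 hx with rfl | h
    · omega
    · exact hrest x h
  by_cases hr : r < 0
  · rw [pvCountB_neg _ hall _ hr, pvCountB_neg _ hrest _ hr, pvCountB_neg _ hall _ (by omega)]
    omega
  rw [not_lt] at hr
  have hq0 : 0 ≤ PySem.Int.floordiv r p := by
    rw [PySem.Int.floordiv_eq_ediv_of_pos (by omega)]
    exact Int.ediv_nonneg hr (by omega)
  conv_lhs => rw [pvCountB]
  rw [PySem.List.pyRange_one_cons (by omega)]
  simp only [List.map_cons, List.sum_cons, zero_mul, sub_zero]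
  congr 1
  by_cases hrp : r < p
  · have hq : PySem.Int.floordiv r p = 0 := by
      rw [PySem.Int.floordiv_eq_ediv_of_pos (by omega)]
      exact Int.ediv_eq_zero_of_lt hr hrp
    rw [hq, pvCountB_neg _ hall _ (by omega),
      PySem.List.pyRange_one_eq_nil (by omega : (0:Int) + 1 ≤ 0 + 1)]
    simp
  · rw [not_lt] at hrp
    have hq' : PySem.Int.floordiv (r - p) p = PySem.Int.floordiv r p - 1 := by
      rw [PySem.Int.floordiv_eq_ediv_of_pos (by omega), PySem.Int.floordiv_eq_ediv_of_pos (by omega)]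
      have : r - p = r + (-1) * p := by ring
      rw [this, Int.add_mul_ediv_right _ _ (by omega : p ≠ 0)]
      ring
    conv_rhs => rw [pvCountB]
    rw [hq']
    rw [PySem.List.pyRange_one, PySem.List.pyRange_one]
    rw [List.map_map, List.map_map]
    have hlen : (PySem.Int.floordiv r p + 1 - (0 + 1)).toNat = (PySem.Int.floordiv r p - 1 + 1 - 0).toNat := by omega
    rw [hlen]
    apply congrArg
    apply List.map_congr_left
    intro k _
    simp only [Function.comp]
    have : r - (0 + 1 + (k : Int)) * p = r - p - (0 + (k : Int)) * p := by ring
    rw [this]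

theorem pvCountB_big (p : Int) (rest : List Int) (r : Int) (h0 : 0 ≤ r) (hr : r < p) :
    pvCountB (p :: rest) r = pvCountB rest r := by
  have hq : PySem.Int.floordiv r p = 0 := by
    rw [PySem.Int.floordiv_eq_ediv_of_pos (by omega)]
    exact Int.ediv_eq_zero_of_lt h0 hr
  have h1 : PySem.List.pyRange 0 1 1 = [0] := by decide
  rw [pvCountB]
  simp [hq, h1]

theorem pvCountB_comm (a b : Int) (L : List Int) (ha : 1 ≤ a) (hb : 1 ≤ b)
    (hL : ∀ x ∈ L, 1 ≤ x) (r : Int) : pvCountB (a :: b :: L) r = pvCountB (b :: a :: L) r := by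
  have habL : ∀ x ∈ a :: b :: L, 1 ≤ x := by
    intro x hx
    rcases List.mem_cons.1 hx with rfl | hx
    · omega
    rcases List.mem_cons.1 hx with rfl | hx
    · omega
    · exact hL x hx
  have hbaL : ∀ x ∈ b :: a :: L, 1 ≤ x := by
    intro x hx
    rcases List.mem_cons.1 hx with rfl | hx
    · omega
    rcases List.mem_cons.1 hx with rfl | hx
    · omega
    · exact hL x hx
  have haL : ∀ x ∈ a :: L, 1 ≤ x := by
    intro x hx
    rcases List.mem_cons.1 hx with rfl | hx
    · omega
    · exact hL x hx
  have hbL : ∀ x ∈ b :: L, 1 ≤ x := by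
    intro x hx
    rcases List.mem_cons.1 hx with rfl | hx
    · omega
    · exact hL x hx
  have key : ∀ k : Nat, ∀ r : Int, r ≤ (k : Int) →
      pvCountB (a :: b :: L) r = pvCountB (b :: a :: L) r := by
    intro k
    induction k with
    | zero =>
      intro r hrk
      by_cases hneg : r < 0
      · rw [pvCountB_neg _ habL _ hneg, pvCountB_neg _ hbaL _ hneg]
      · have hr0 : r = 0 := by omega
        subst hr0
        rw [pvCountB_zero _ habL, pvCountB_zero _ hbaL]
    | succ k ih =>
      intro r hrk
      by_cases hneg : r < 0
      · rw [pvCountB_neg _ habL _ hneg, pvCountB_neg _ hbaL _ hneg]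
      rw [not_lt] at hneg
      by_cases hrk' : r ≤ (k : Int)
      · exact ih r hrk'
      have step : ∀ r' : Int, r' ≤ r - 1 →
          pvCountB (a :: b :: L) r' = pvCountB (b :: a :: L) r' := by
        intro r' h'
        by_cases hneg' : r' < 0
        · rw [pvCountB_neg _ habL _ hneg', pvCountB_neg _ hbaL _ hneg']
        · exact ih r' (by omega)
      calc pvCountB (a :: b :: L) r
          = pvCountB (b :: L) r + pvCountB (a :: b :: L) (r - a) :=
            pvCountB_rec a (b :: L) ha hbL r
        _ = (pvCountB L r + pvCountB (b :: L) (r - b)) + pvCountB (b :: a :: L) (r - a) := by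
            rw [pvCountB_rec b L hb hL r, step (r - a) (by omega)]
        _ = (pvCountB L r + pvCountB (b :: L) (r - b)) +
              (pvCountB (a :: L) (r - a) + pvCountB (b :: a :: L) (r - a - b)) := by
            rw [pvCountB_rec b (a :: L) hb haL (r - a)]
        _ = (pvCountB L r + pvCountB (a :: L) (r - a)) +
              (pvCountB (b :: L) (r - b) + pvCountB (a :: b :: L) (r - b - a)) := by
            rw [step (r - b - a) (by omega)]
            have : r - a - b = r - b - a := by ring
            rw [this]; ring
        _ = (pvCountB L r + pvCountB (a :: L) (r - a)) + pvCountB (b :: a :: L) (r - b) := by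
            rw [← step (r - b) (by omega), pvCountB_rec a (b :: L) ha hbL (r - b)]
        _ = pvCountB (a :: L) r + pvCountB (b :: a :: L) (r - b) := by
            rw [pvCountB_rec a L ha hL r]
        _ = pvCountB (b :: a :: L) r := (pvCountB_rec b (a :: L) hb haL r).symm
  by_cases hneg : r < 0
  · rw [pvCountB_neg _ habL _ hneg, pvCountB_neg _ hbaL _ hneg]
  · exact key r.toNat r (by omega)

theorem pvCountB_perm (L M : List Int) (h : L.Perm M) :
    (∀ x ∈ L, 1 ≤ x) → ∀ r, pvCountB L r = pvCountB M r := by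
  induction h with
  | nil => intro _ r; rfl
  | cons x h ih =>
    intro hL r
    simp only [pvCountB]
    apply congrArg
    apply List.map_congr_left
    intro c _
    exact ih (fun y hy => hL y (List.mem_cons_of_mem _ hy)) _
  | swap x y L =>
    intro hL r
    have hy : 1 ≤ y := hL y (List.mem_cons_self ..)
    have hx : 1 ≤ x := hL x (List.mem_cons_of_mem _ (List.mem_cons_self ..))
    exact pvCountB_comm y x L hy hx
      (fun z hz => hL z (List.mem_cons_of_mem _ (List.mem_cons_of_mem _ hz))) r
  | trans h1 h2 ih1 ih2 =>
    intro hL r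
    rw [ih1 hL r, ih2 (fun y hy => hL y ((h1.mem_iff).2 hy)) r]

def pvVec (K : Nat) (M : List Int) : List Int :=
  (List.range K).map (fun (j : Nat) => pvCountB M (j : Int))

theorem pvVec_get (K : Nat) (L : List Int) (j : Int) (hj : 0 ≤ j) (hjK : j.toNat < K) :
    PySem.List.pyGetD (pvVec K L) j 0 = pvCountB L j := by
  rw [PySem.List.pyGetD_of_nonneg _ _ hj]
  unfold pvVec
  rw [PySem.List.getD_map_range _ _ _ _ hjK, Int.toNat_of_nonneg hj]

-- ===== A-side: the in-place 1-D sweep computes pvVec part by part =====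

def pvMix (K : Nat) (i : Int) (M : List Int) (m : Int) : List Int :=
  (List.range K).map (fun (j : Nat) => if (j : Int) < m then pvCountB (i :: M) (j : Int) else pvCountB M (j : Int))

theorem pvMix_lo (n i : Int) (_hn : 0 ≤ n) (_hi : 1 ≤ i) (M : List Int) :
    pvMix (n.toNat + 1) i M i = pvVec (n.toNat + 1) M := by
  unfold pvMix pvVec
  apply List.map_congr_left
  intro j _
  by_cases hj : (j : Int) < i
  · rw [if_pos hj, pvCountB_big i M _ (by omega) hj]
  · rw [if_neg hj]

theorem pvMix_hi (n i : Int) (hn : 0 ≤ n) (M : List Int) :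
    pvMix (n.toNat + 1) i M (n + 1) = pvVec (n.toNat + 1) (i :: M) := by
  unfold pvMix pvVec
  apply List.map_congr_left
  intro j hj
  rw [List.mem_range] at hj
  rw [if_pos (by omega)]

theorem pvMix_step (n i : Int) (hn : 0 ≤ n) (hi : 1 ≤ i) (M : List Int)
    (hM : ∀ x ∈ M, 1 ≤ x) (m : Int) (him : i ≤ m) (hmn : m ≤ n) :
    PySem.List.pySetD (pvMix (n.toNat + 1) i M m) m
      (PySem.List.pyGetD (pvMix (n.toNat + 1) i M m) m 0 +
       PySem.List.pyGetD (pvMix (n.toNat + 1) i M m) (m - i) 0) =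
    pvMix (n.toNat + 1) i M (m + 1) := by
  have hmN : m.toNat < n.toNat + 1 := by omega
  have htN : (m - i).toNat < n.toNat + 1 := by omega
  have hget1 : PySem.List.pyGetD (pvMix (n.toNat + 1) i M m) m 0 = pvCountB M m := by
    rw [PySem.List.pyGetD_of_nonneg _ _ (by omega)]
    unfold pvMix
    rw [PySem.List.getD_map_range _ _ _ _ hmN]
    rw [if_neg (by omega), Int.toNat_of_nonneg (by omega)]
  have hget2 : PySem.List.pyGetD (pvMix (n.toNat + 1) i M m) (m - i) 0 = pvCountB (i :: M) (m - i) := by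
    rw [PySem.List.pyGetD_of_nonneg _ _ (by omega)]
    unfold pvMix
    rw [PySem.List.getD_map_range _ _ _ _ htN]
    rw [if_pos (by omega), Int.toNat_of_nonneg (by omega)]
  rw [hget1, hget2, PySem.List.pySetD_of_nonneg _ _ (by omega)]
  have hval : pvCountB M m + pvCountB (i :: M) (m - i) = pvCountB (i :: M) m :=
    (pvCountB_rec i M hi hM m).symm
  rw [hval]
  unfold pvMix
  apply List.ext_getElem
  · simp
  intro t h1 h2
  have htK : t < n.toNat + 1 := by simpa using h2
  rw [List.getElem_set]
  by_cases hteq : m.toNat = t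
  · rw [if_pos hteq]
    subst hteq
    rw [List.getElem_map, List.getElem_range, if_pos (by omega)]
    congr 1
    omega
  · rw [if_neg hteq]
    simp only [List.getElem_map, List.getElem_range]
    have hne : (t : Int) ≠ m := by omega
    by_cases hc : (t : Int) < m
    · rw [if_pos hc, if_pos (by omega)]
    · rw [if_neg hc, if_neg (by omega)]

theorem pvMix_fold (n i : Int) (hn : 0 ≤ n) (hi : 1 ≤ i) (M : List Int)
    (hM : ∀ x ∈ M, 1 ≤ x) :
    ∀ d : Nat, ∀ m : Int, i ≤ m → m ≤ n + 1 → n + 1 - m ≤ (d : Int) →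
    (PySem.List.pyRange m (n + 1) 1).foldl (fun dp j =>
        PySem.List.pySetD dp j (PySem.List.pyGetD dp j 0 + PySem.List.pyGetD dp (j - i) 0))
      (pvMix (n.toNat + 1) i M m) = pvMix (n.toNat + 1) i M (n + 1) := by
  intro d
  induction d with
  | zero =>
    intro m him hm1 hd
    have hm : m = n + 1 := by omega
    rw [PySem.List.pyRange_one_eq_nil (by omega), List.foldl_nil, hm]
  | succ d ih =>
    intro m him hm1 hd
    by_cases hm : n + 1 ≤ m
    · have hm' : m = n + 1 := by omega
      rw [PySem.List.pyRange_one_eq_nil (by omega), List.foldl_nil, hm']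
    · rw [not_le] at hm
      rw [PySem.List.pyRange_one_cons hm, List.foldl_cons,
        pvMix_step n i hn hi M hM m him (by omega)]
      exact ih (m + 1) (by omega) (by omega) (by omega)

theorem pvInner_eq (n i : Int) (hn : 0 ≤ n) (hi : 1 ≤ i) (M : List Int)
    (hM : ∀ x ∈ M, 1 ≤ x) :
    (PySem.List.pyRange i (n + 1) 1).foldl (fun dp j =>
        PySem.List.pySetD dp j (PySem.List.pyGetD dp j 0 + PySem.List.pyGetD dp (j - i) 0))
      (pvVec (n.toNat + 1) M) = pvVec (n.toNat + 1) (i :: M) := by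
  by_cases hle : i ≤ n + 1
  · rw [← pvMix_lo n i hn hi M,
      pvMix_fold n i hn hi M hM (n + 1 - i).toNat i le_rfl hle (by omega),
      pvMix_hi n i hn M]
  · rw [not_le] at hle
    rw [PySem.List.pyRange_one_eq_nil (by omega), List.foldl_nil]
    unfold pvVec
    apply List.map_congr_left
    intro j hj
    rw [List.mem_range] at hj
    exact (pvCountB_big i M _ (by omega) (by omega)).symm

theorem pvDp1_eq (n : Int) (hn : 0 ≤ n) :
    PySem.List.pySetD (List.replicate ((n + 1)).toNat (0 : Int)) 0 1 = pvVec (n.toNat + 1) [] := by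
  rw [PySem.List.pySetD_of_nonneg _ _ (by omega : (0:Int) ≤ 0)]
  have hK : (n + 1).toNat = n.toNat + 1 := by omega
  rw [hK]
  apply List.ext_getElem
  · simp [pvVec]
  intro t h1 h2
  have htK : t < n.toNat + 1 := by simpa using h1
  rw [List.getElem_set]
  unfold pvVec
  rw [List.getElem_map, List.getElem_range]
  by_cases ht : t = 0
  · subst ht
    simp [pvCountB]
  · rw [if_neg (by omega), List.getElem_replicate]
    simp only [pvCountB]
    rw [if_neg (by exact_mod_cast ht)]

theorem pvFold_parts (n : Int) (hn : 0 ≤ n) :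
    ∀ P M : List Int, (∀ x ∈ P, 1 ≤ x) → (∀ x ∈ M, 1 ≤ x) →
    P.foldl (fun dp i =>
        (PySem.List.pyRange i (n + 1) 1).foldl (fun dp j =>
          PySem.List.pySetD dp j (PySem.List.pyGetD dp j 0 + PySem.List.pyGetD dp (j - i) 0)) dp)
      (pvVec (n.toNat + 1) M) = pvVec (n.toNat + 1) (P.reverse ++ M) := by
  intro P
  induction P with
  | nil => intro M _ _; simp
  | cons p P' ih =>
    intro M hP hM
    have hp : 1 ≤ p := hP p (List.mem_cons_self ..)
    rw [List.foldl_cons, pvInner_eq n p hn hp M hM,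
      ih (p :: M) (fun x hx => hP x (List.mem_cons_of_mem _ hx))
        (by
          intro x hx
          rcases List.mem_cons.1 hx with rfl | hx
          · omega
          · exact hM x hx)]
    congr 1
    simp

theorem pvA_eq (n : Int) (arr : List Int) (hn : 0 ≤ n) (hpos : ∀ x ∈ arr, 1 ≤ x) :
    partition_generalised n arr = pvCountB arr n := by
  unfold partition_generalised
  simp only []
  set S := PySem.List.sorted arr (fun x => x) false with hS
  have hSpos : ∀ x ∈ S, 1 ≤ x := by
    intro x hx
    exact hpos x ((PySem.List.mem_sorted ..).1 hx)
  have hRpos : ∀ x ∈ S.reverse, 1 ≤ x := by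
    intro x hx
    exact hSpos x (List.mem_reverse.1 hx)
  rw [pvDp1_eq n hn, pvFold_parts n hn S [] hSpos (by intro x hx; cases hx)]
  rw [List.append_nil, PySem.List.pyGetD_of_nonneg _ _ hn]
  unfold pvVec
  rw [PySem.List.getD_map_range _ _ _ _ (by omega)]
  have hcast : ((n.toNat : Int)) = n := by omega
  rw [hcast]
  have hperm : S.reverse.Perm arr := (List.reverse_perm S).trans (PySem.List.sorted_perm ..)
  exact pvCountB_perm S.reverse arr hperm hRpos n

-- ===== B-side: divide and conquer + convolution computes pvVec =====

-- coefficient vector of a single part is the divisibility indicator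
theorem pvCountB_single (p : Int) (hp : 1 ≤ p) :
    ∀ (R : Nat) (r : Int), 0 ≤ r → r.toNat ≤ R →
    pvCountB [p] r = if PySem.Int.mod r p = 0 then 1 else 0 := by
  intro R
  induction R with
  | zero =>
    intro r h0 hR
    have hr : r = 0 := by omega
    subst hr
    rw [pvCountB_big p [] 0 le_rfl (by omega)]
    have hmod : PySem.Int.mod 0 p = 0 := by
      rw [PySem.Int.mod_eq_emod_of_pos (by omega)]; simp
    simp [pvCountB, hmod]
  | succ R ih =>
    intro r h0 hR
    by_cases hrp : r < p
    · rw [pvCountB_big p [] r h0 hrp]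
      have hmod : PySem.Int.mod r p = r := by
        rw [PySem.Int.mod_eq_emod_of_pos (by omega)]
        exact Int.emod_eq_of_lt h0 hrp
      rw [hmod]
      simp [pvCountB]
    · rw [not_lt] at hrp
      rw [pvCountB_rec p [] hp (by intro x hx; cases hx) r]
      have h1 : pvCountB [] r = 0 := by
        simp [pvCountB]; omega
      have hmod : PySem.Int.mod r p = PySem.Int.mod (r - p) p := by
        rw [PySem.Int.mod_eq_emod_of_pos (by omega), PySem.Int.mod_eq_emod_of_pos (by omega)]
        exact (Int.sub_emod_right r p).symm
      rw [h1, zero_add, hmod, ih (r - p) (by omega) (by omega)]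

-- the convolution sum of two coefficient vectors
def pvS (L1 L2 : List Int) (m : Int) : Int :=
  ((List.range (m.toNat + 1)).map
    (fun (j : Nat) => pvCountB L1 (j : Int) * pvCountB L2 (m - (j : Int)))).sum

theorem pvS_nil (L2 : List Int) (m : Int) (_hm : 0 ≤ m) : pvS [] L2 m = pvCountB L2 m := by
  unfold pvS
  rw [List.range_succ_eq_map]
  simp only [List.map_cons, List.sum_cons]
  have h0 : pvCountB [] ((0 : Nat) : Int) = 1 := by simp [pvCountB]
  have htail : (((List.range m.toNat).map Nat.succ).map
      (fun (j : Nat) => pvCountB [] (j : Int) * pvCountB L2 (m - (j : Int)))).sum = 0 := by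
    apply List.sum_eq_zero
    intro x hx
    rcases List.mem_map.1 hx with ⟨j, hj, rfl⟩
    rcases List.mem_map.1 hj with ⟨k, _, rfl⟩
    have : pvCountB [] ((Nat.succ k : Nat) : Int) = 0 := by
      simp [pvCountB]; omega
    rw [this, zero_mul]
  rw [h0, htail]
  simp

theorem pvConv_step (p : Int) (rest L2 : List Int) (hp : 1 ≤ p)
    (hrest : ∀ x ∈ rest, 1 ≤ x) (hL2 : ∀ x ∈ L2, 1 ≤ x) (m : Int) (hm : 0 ≤ m)
    (hR : ∀ m', 0 ≤ m' → pvS rest L2 m' = pvCountB (rest ++ L2) m')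
    (hI : ∀ m', 0 ≤ m' → m'.toNat < m.toNat → pvS (p :: rest) L2 m' = pvCountB ((p :: rest) ++ L2) m') :
    pvS (p :: rest) L2 m = pvCountB ((p :: rest) ++ L2) m := by
  have hall : ∀ x ∈ p :: rest, 1 ≤ x := by
    intro x hx
    rcases List.mem_cons.1 hx with rfl | h
    · omega
    · exact hrest x h
  have hRL2 : ∀ x ∈ rest ++ L2, 1 ≤ x := by
    intro x hx
    rcases List.mem_append.1 hx with h | h
    · exact hrest x h
    · exact hL2 x h
  have hallL2 : ∀ x ∈ (p :: rest) ++ L2, 1 ≤ x := by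
    intro x hx
    rcases List.mem_cons.1 hx with rfl | h
    · omega
    · exact hRL2 x h
  have hsplit : pvS (p :: rest) L2 m = pvS rest L2 m +
      ((List.range (m.toNat + 1)).map
        (fun (j : Nat) => pvCountB (p :: rest) ((j : Int) - p) * pvCountB L2 (m - (j : Int)))).sum := by
    unfold pvS
    rw [← PySem.List.sum_map_add_int]
    apply congrArg
    apply List.map_congr_left
    intro j _
    rw [pvCountB_rec p rest hp hrest (j : Int), add_mul]
  have hshift : ((List.range (m.toNat + 1)).map
      (fun (j : Nat) => pvCountB (p :: rest) ((j : Int) - p) * pvCountB L2 (m - (j : Int)))).sum =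
      pvCountB ((p :: rest) ++ L2) (m - p) := by
    by_cases hmp : m - p < 0
    · have hz : ((List.range (m.toNat + 1)).map
          (fun (j : Nat) => pvCountB (p :: rest) ((j : Int) - p) * pvCountB L2 (m - (j : Int)))).sum = 0 := by
        apply List.sum_eq_zero
        intro x hx
        rcases List.mem_map.1 hx with ⟨j, hj, rfl⟩
        rw [List.mem_range] at hj
        rw [pvCountB_neg _ hall _ (by omega), zero_mul]
      rw [hz, pvCountB_neg _ hallL2 _ hmp]
    · rw [not_lt] at hmp
      have hPm : p.toNat ≤ m.toNat := by omega
      have hcount : m.toNat + 1 = p.toNat + ((m - p).toNat + 1) := by omega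
      rw [hcount, List.range_add, List.map_append, List.sum_append]
      have hz : ((List.range p.toNat).map
          (fun (j : Nat) => pvCountB (p :: rest) ((j : Int) - p) * pvCountB L2 (m - (j : Int)))).sum = 0 := by
        apply List.sum_eq_zero
        intro x hx
        rcases List.mem_map.1 hx with ⟨j, hj, rfl⟩
        rw [List.mem_range] at hj
        rw [pvCountB_neg _ hall _ (by omega), zero_mul]
      rw [hz, zero_add, List.map_map]
      have hmain : (((List.range ((m - p).toNat + 1)).map
          ((fun (j : Nat) => pvCountB (p :: rest) ((j : Int) - p) * pvCountB L2 (m - (j : Int))) ∘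
            (fun x => p.toNat + x)))).sum = pvS (p :: rest) L2 (m - p) := by
        unfold pvS
        apply congrArg
        apply List.map_congr_left
        intro k _
        simp only [Function.comp]
        have h1 : ((p.toNat + k : Nat) : Int) - p = (k : Int) := by
          push_cast; omega
        have h2 : m - ((p.toNat + k : Nat) : Int) = m - p - (k : Int) := by
          push_cast; omega
        rw [h1, h2]
      rw [hmain]
      exact hI (m - p) (by omega) (by omega)
  rw [hsplit, hshift, hR m hm]
  exact (pvCountB_rec p (rest ++ L2) hp hRL2 m).symm

theorem pvConv (L2 : List Int) (hL2 : ∀ x ∈ L2, 1 ≤ x) :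
    ∀ (L1 : List Int), (∀ x ∈ L1, 1 ≤ x) → ∀ m : Int, 0 ≤ m →
    pvS L1 L2 m = pvCountB (L1 ++ L2) m := by
  intro L1
  induction L1 with
  | nil => intro _ m hm; rw [List.nil_append]; exact pvS_nil L2 m hm
  | cons p rest ih =>
    intro hL1 m hm
    have hp : 1 ≤ p := hL1 p (List.mem_cons_self ..)
    have hrest : ∀ x ∈ rest, 1 ≤ x := fun x hx => hL1 x (List.mem_cons_of_mem _ hx)
    have main : ∀ (M : Nat) (m' : Int), 0 ≤ m' → m'.toNat ≤ M →
        pvS (p :: rest) L2 m' = pvCountB ((p :: rest) ++ L2) m' := by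
      intro M
      induction M with
      | zero =>
        intro m' h0 hM
        exact pvConv_step p rest L2 hp hrest hL2 m' h0 (fun m'' h => ih hrest m'' h)
          (fun m'' h1 h2 => absurd h2 (by omega))
      | succ M ihM =>
        intro m' h0 hM
        exact pvConv_step p rest L2 hp hrest hL2 m' h0 (fun m'' h => ih hrest m'' h)
          (fun m'' h1 h2 => ihM m'' h1 (by omega))
    exact main m.toNat m hm le_rfl

theorem pvMerge (n : Int) (hn : 0 ≤ n) (L1 L2 : List Int)
    (h1 : ∀ x ∈ L1, 1 ≤ x) (h2 : ∀ x ∈ L2, 1 ≤ x) :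
    (PySem.List.pyRange 0 (n + 1) 1).map (fun m =>
      ((PySem.List.pyRange 0 (m + 1) 1).map
        (fun j => PySem.List.pyGetD (pvVec (n.toNat + 1) L1) j 0 *
                  PySem.List.pyGetD (pvVec (n.toNat + 1) L2) (m - j) 0)).sum) =
    pvVec (n.toNat + 1) (L1 ++ L2) := by
  rw [PySem.List.pyRange_one, List.map_map]
  have hK : (n + 1 - 0).toNat = n.toNat + 1 := by omega
  rw [hK]
  conv_rhs => rw [pvVec]
  apply List.map_congr_left
  intro mi hmi
  rw [List.mem_range] at hmi
  simp only [Function.comp]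
  have hm0 : (0 : Int) + (mi : Int) = (mi : Int) := by omega
  rw [hm0]
  have hinner : (PySem.List.pyRange 0 ((mi : Int) + 1) 1).map
      (fun j => PySem.List.pyGetD (pvVec (n.toNat + 1) L1) j 0 *
                PySem.List.pyGetD (pvVec (n.toNat + 1) L2) ((mi : Int) - j) 0) =
      (List.range (mi + 1)).map
        (fun (j : Nat) => pvCountB L1 (j : Int) * pvCountB L2 ((mi : Int) - (j : Int))) := by
    rw [PySem.List.pyRange_one, List.map_map]
    have hk : ((mi : Int) + 1 - 0).toNat = mi + 1 := by omega
    rw [hk]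
    apply List.map_congr_left
    intro k hk'
    rw [List.mem_range] at hk'
    simp only [Function.comp]
    have hz : (0 : Int) + (k : Int) = (k : Int) := by omega
    rw [hz, pvVec_get _ _ _ (by omega) (by omega), pvVec_get _ _ _ (by omega) (by omega)]
  rw [hinner]
  have hS : ((List.range (mi + 1)).map
      (fun (j : Nat) => pvCountB L1 (j : Int) * pvCountB L2 ((mi : Int) - (j : Int)))).sum =
      pvS L1 L2 (mi : Int) := by
    unfold pvS
    have : ((mi : Int)).toNat = mi := by omega
    rw [this]
  rw [hS]
  exact pvConv L2 h2 L1 h1 (mi : Int) (by omega)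

theorem pvSeriesB_eq (n : Int) (hn : 0 ≤ n) :
    ∀ (N : Nat) (parts : List Int), parts.length ≤ N → (∀ x ∈ parts, 1 ≤ x) →
    pvSeriesB n parts = pvVec (n.toNat + 1) parts := by
  intro N
  induction N with
  | zero =>
    intro parts hlen hpos
    have : parts = [] := List.length_eq_zero_iff.1 (by omega)
    subst this
    rw [pvSeriesB]
    unfold pvVec
    rw [List.range_succ_eq_map]
    simp only [List.map_cons, List.map_map]
    have h0 : pvCountB [] ((0 : Nat) : Int) = 1 := by simp [pvCountB]
    rw [h0]
    congr 1
    apply List.ext_getElem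
    · simp
    intro t ht1 ht2
    simp only [List.getElem_replicate, List.getElem_map, List.getElem_range,
      Function.comp_apply, pvCountB]
    rw [if_neg (by push_cast; omega)]
  | succ N ihN =>
    intro parts hlen hpos
    match parts with
    | [] =>
      exact ihN [] (by simp) hpos
    | [p] =>
      have hp : 1 ≤ p := hpos p (List.mem_cons_self ..)
      rw [pvSeriesB, PySem.List.pyRange_one, List.map_map]
      have hK : (n + 1 - 0).toNat = n.toNat + 1 := by omega
      rw [hK]
      unfold pvVec
      apply List.map_congr_left
      intro j hj
      rw [List.mem_range] at hj
      simp only [Function.comp_apply, zero_add]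
      exact (pvCountB_single p hp ((j : Int)).toNat ((j : Int)) (by omega) le_rfl).symm
    | p :: q :: rest =>
      rw [pvSeriesB]
      have hlen2 : (p :: q :: rest).length = rest.length + 2 := by simp
      have htk : ((p :: q :: rest).take ((p :: q :: rest).length / 2)).length ≤ N := by
        simp [List.length_take]; omega
      have hdr : ((p :: q :: rest).drop ((p :: q :: rest).length / 2)).length ≤ N := by
        simp [List.length_drop]; omega
      have htpos : ∀ x ∈ (p :: q :: rest).take ((p :: q :: rest).length / 2), 1 ≤ x :=
        fun x hx => hpos x (List.mem_of_mem_take hx)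
      have hdpos : ∀ x ∈ (p :: q :: rest).drop ((p :: q :: rest).length / 2), 1 ≤ x :=
        fun x hx => hpos x (List.mem_of_mem_drop hx)
      rw [ihN _ htk htpos, ihN _ hdr hdpos, pvMerge n hn _ _ htpos hdpos,
        List.take_append_drop]

theorem pvAlt_eq (n : Int) (arr : List Int) (hn : 0 ≤ n) (hpos : ∀ x ∈ arr, 1 ≤ x) :
    partition_generalised_alt n arr = pvCountB arr n := by
  unfold partition_generalised_alt
  rw [pvSeriesB_eq n hn arr.length arr le_rfl hpos, pvVec_get _ _ _ hn (by omega)]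

theorem pv_main (n : Int) (arr : List Int) (hn : 0 ≤ n) (hpos : ∀ x ∈ arr, 1 ≤ x) :
    partition_generalised n arr = partition_generalised_alt n arr := by
  rw [pvA_eq n arr hn hpos, pvAlt_eq n arr hn hpos]

-- ===== VERDICT (by name: the statement is the Claim_ definition above) =====
theorem partition_generalised_spec : Claim_equal_partition_generalised := by
  intro n arr _hdom hpre
  unfold Spec_partition_generalised
  exact pv_main n arr hpre.1 hpre.2
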